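-- pv_equiv track=rewrite | github.com/im-h-a-r-s-h/LeetCode | 2658-Maximum-Number-of-Fish-in-a-Grid/2658-Maximum-Number-of-Fish-in-a-Grid.py | numOfFish
-- ===== SOURCE A (Python) =====
-- from typing import List
--
-- def numOfFish(grid: List[List[int]]) -> int:
--     rows, cols = len(grid), len(grid[0])
--     visited = set()
--
--     def dfs(r, c):
--         if r < 0 or r >= rows or c < 0 or c >= cols or (r, c) in visited or grid[r][c] == 0:
--             return 0
--         visited.add((r, c))
--         fish_count = grid[r][c]
--         for dr, dc in [(0, 1), (1, 0), (0, -1), (-1, 0)]: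
--             fish_count += dfs(r + dr, c + dc)
--         return fish_count
--
--     max_fish = 0
--     for r in range(rows):
--         for c in range(cols):
--             if grid[r][c] != 0 and (r, c) not in visited:
--                 max_fish = max(max_fish, dfs(r, c))
--
--     return max_fish
-- ===== SOURCE B (Python) =====
-- from typing import List
--
-- def numOfFish(grid: List[List[int]]) -> int:
--     rows, cols = len(grid), len(grid[0])
--     visited = set()
--     best = 0
--     for r in range(rows):
--         for c in range(cols):
--             if grid[r][c] != 0 and (r, c) not in visited:
--                 total = 0
--                 stack = [(r, c)]
--                 while stack:
--                     i, j = stack.pop()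
--                     if i < 0 or i >= rows or j < 0 or j >= cols or (i, j) in visited or grid[i][j] == 0:
--                         continue
--                     visited.add((i, j))
--                     total += grid[i][j]
--                     stack.extend([(i - 1, j), (i, j - 1), (i + 1, j), (i, j + 1)])
--                 best = max(best, total)
--     return best
-- ===== Notes on version B (the rewrite author's own statement) =====
-- stated objective: alternative
-- what changed: Replaces the recursive DFS helper with an iterative flood fill over an explicit stack (no recursion, no helper function), accumulating each component's total in a loop.
import Mathlib
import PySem

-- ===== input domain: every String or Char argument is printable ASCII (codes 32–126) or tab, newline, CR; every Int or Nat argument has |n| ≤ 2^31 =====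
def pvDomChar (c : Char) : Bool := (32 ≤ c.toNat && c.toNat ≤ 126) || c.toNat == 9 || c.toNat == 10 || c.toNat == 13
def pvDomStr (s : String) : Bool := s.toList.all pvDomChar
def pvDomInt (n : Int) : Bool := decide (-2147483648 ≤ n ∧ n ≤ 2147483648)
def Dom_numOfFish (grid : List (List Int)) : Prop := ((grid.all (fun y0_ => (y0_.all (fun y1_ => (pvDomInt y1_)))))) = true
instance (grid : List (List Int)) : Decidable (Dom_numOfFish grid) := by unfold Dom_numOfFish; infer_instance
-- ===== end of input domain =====

-- B replaces A's recursive DFS helper with an iterative explicit-stack flood fill (alternative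
-- decomposition, same cost); equivalence is about the return value (neither mutates its argument).

-- ===== PORT A =====
-- grid[r][c]: only evaluated under the bounds guard (0 ≤ r < rows, 0 ≤ c < cols), where it is
-- exact for the inputs admitted by Pre_numOfFish (every row has at least `cols` entries).
def pvCell (grid : List (List Int)) (r c : Int) : Int :=
  (grid.getD r.toNat []).getD c.toNat 0

-- A's recursive `dfs`, with fuel making the recursion structural; numOfFish passes fuel
-- rows*cols+1, which the proofs show is never exhausted (recursion depth ≤ unvisited cells + 1).
def pvDfsA (grid : List (List Int)) (rows cols : Int) :
    Nat → Int → Int → List (Int × Int) → Int × List (Int × Int)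
  | 0, _, _, vis => (0, vis)
  | fuel + 1, r, c, vis =>
    if r < 0 ∨ rows ≤ r ∨ c < 0 ∨ cols ≤ c ∨ (r, c) ∈ vis ∨ pvCell grid r c = 0 then
      (0, vis)
    else
      let vis1 := (r, c) :: vis
      let p1 := pvDfsA grid rows cols fuel r (c + 1) vis1
      let p2 := pvDfsA grid rows cols fuel (r + 1) c p1.2
      let p3 := pvDfsA grid rows cols fuel r (c - 1) p2.2
      let p4 := pvDfsA grid rows cols fuel (r - 1) c p3.2
      (pvCell grid r c + p1.1 + p2.1 + p3.1 + p4.1, p4.2)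

def numOfFish (grid : List (List Int)) : Int :=
  let rows : Int := grid.length
  let cols : Int := (grid.headD []).length
  let fuel : Nat := grid.length * (grid.headD []).length + 1
  ((PySem.List.pyRange 0 rows 1).foldl (fun st r =>
    (PySem.List.pyRange 0 cols 1).foldl (fun (st : Int × List (Int × Int)) c =>
      if pvCell grid r c ≠ 0 ∧ (r, c) ∉ st.2 then
        let p := pvDfsA grid rows cols fuel r c st.2
        (max st.1 p.1, p.2)
      else st) st) ((0 : Int), ([] : List (Int × Int)))).1

-- ===== PORT B =====
-- termination measure helpers for B's while-loop: the in-bounds cells and how many of them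
-- are not yet visited.
def pvAllCells (rows cols : Int) : List (Int × Int) :=
  (List.range rows.toNat).flatMap (fun a => (List.range cols.toNat).map (fun b => ((a : Int), (b : Int))))

def pvMu (rows cols : Int) (vis : List (Int × Int)) : Nat :=
  (pvAllCells rows cols).countP (fun p => decide (p ∉ vis))

theorem pvCountP_lt {α : Type} (l : List α) (a : α) (pA pB : α → Bool)
    (hmono : ∀ x, pA x = true → pB x = true) (hm : a ∈ l) (ha : pA a = false)
    (hb : pB a = true) : l.countP pA < l.countP pB := by
  obtain ⟨s, t, rfl⟩ := List.append_of_mem hm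
  have hs : s.countP pA ≤ s.countP pB := List.countP_mono_left (fun x _ => hmono x)
  have ht : t.countP pA ≤ t.countP pB := List.countP_mono_left (fun x _ => hmono x)
  simp only [List.countP_append, List.countP_cons, ha, hb, Bool.false_eq_true, if_false, if_true]
  omega

theorem pvMem_allCells (rows cols i j : Int)
    (h1 : 0 ≤ i) (h2 : i < rows) (h3 : 0 ≤ j) (h4 : j < cols) :
    (i, j) ∈ pvAllCells rows cols := by
  simp [pvAllCells]
  exact ⟨⟨i.toNat, by omega, by omega⟩, ⟨j.toNat, by omega, by omega⟩⟩

theorem pvMu_cons_lt (rows cols i j : Int) (vis : List (Int × Int))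
    (h1 : 0 ≤ i) (h2 : i < rows) (h3 : 0 ≤ j) (h4 : j < cols) (hv : (i, j) ∉ vis) :
    pvMu rows cols ((i, j) :: vis) < pvMu rows cols vis := by
  unfold pvMu
  apply pvCountP_lt _ (i, j)
  · intro x hx
    simp only [decide_eq_true_eq, List.mem_cons] at *
    tauto
  · exact pvMem_allCells rows cols i j h1 h2 h3 h4
  · simp
  · simp [hv]

-- B's `while stack:` loop; the Python stack has its top at the END of the list, the Lean list
-- holds the top at the HEAD (pop() = head, extend [w,x,y,z] = z::y::x::w::·) — same contents.
def pvFill (grid : List (List Int)) (rows cols : Int) :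
    List (Int × Int) → Int → List (Int × Int) → Int × List (Int × Int)
  | [], total, vis => (total, vis)
  | (i, j) :: stack, total, vis =>
    if h : i < 0 ∨ rows ≤ i ∨ j < 0 ∨ cols ≤ j ∨ (i, j) ∈ vis ∨ pvCell grid i j = 0 then
      pvFill grid rows cols stack total vis
    else
      pvFill grid rows cols ((i, j + 1) :: (i + 1, j) :: (i, j - 1) :: (i - 1, j) :: stack)
        (total + pvCell grid i j) ((i, j) :: vis)
  termination_by stack _ vis => 5 * pvMu rows cols vis + stack.length
  decreasing_by
  · simp only [List.length_cons]; omega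
  · push_neg at h
    have := pvMu_cons_lt rows cols i j vis (by omega) (by omega) (by omega) (by omega) h.2.2.2.2.1
    simp only [List.length_cons]
    omega

def numOfFish_alt (grid : List (List Int)) : Int :=
  let rows : Int := grid.length
  let cols : Int := (grid.headD []).length
  ((PySem.List.pyRange 0 rows 1).foldl (fun st r =>
    (PySem.List.pyRange 0 cols 1).foldl (fun (st : Int × List (Int × Int)) c =>
      if pvCell grid r c ≠ 0 ∧ (r, c) ∉ st.2 then
        let p := pvFill grid rows cols [(r, c)] 0 st.2
        (max st.1 p.1, p.2)
      else st) st) ((0 : Int), ([] : List (Int × Int)))).1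

-- ===== PRECONDITION & SPEC =====
-- Pre_ excludes exactly the inputs where Python A raises IndexError: the empty grid (grid[0])
-- and grids with some row shorter than row 0 (grid[r][c] for c < cols).
def Pre_numOfFish (grid : List (List Int)) : Prop :=
  grid ≠ [] ∧ ∀ row ∈ grid, (grid.headD []).length ≤ row.length
instance (grid : List (List Int)) : Decidable (Pre_numOfFish grid) := by
  unfold Pre_numOfFish; infer_instance

def pvWitness_numOfFish : List (List Int) := [[1, 2], [0, 3]]

def Spec_numOfFish (grid : List (List Int)) (out : Int) : Prop := out = numOfFish_alt grid
instance (grid : List (List Int)) (out : Int) : Decidable (Spec_numOfFish grid out) := by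
  unfold Spec_numOfFish; infer_instance

-- ===== CLAIM (what is proved, stated in full; the proofs are below) =====
def Claim_equal_numOfFish : Prop := ∀ (grid : List (List Int)), Dom_numOfFish grid → Pre_numOfFish grid → Spec_numOfFish grid (numOfFish grid)

-- ===== LEMMAS AND PROOFS =====
theorem pvDfsA_subset (grid : List (List Int)) (rows cols : Int) :
    ∀ (fuel : Nat) (r c : Int) (vis : List (Int × Int)),
      vis ⊆ (pvDfsA grid rows cols fuel r c vis).2 := by
  intro fuel
  induction fuel with
  | zero => intro r c vis; simp [pvDfsA]
  | succ f ih =>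
    intro r c vis
    simp only [pvDfsA]
    split
    · simp
    · intro x hx
      exact ih _ _ _ (ih _ _ _ (ih _ _ _ (ih _ _ _ (List.mem_cons_of_mem _ hx))))

theorem pvMu_le_of_subset (rows cols : Int) (vis v' : List (Int × Int)) (h : vis ⊆ v') :
    pvMu rows cols v' ≤ pvMu rows cols vis := by
  apply List.countP_mono_left
  intro x _ hx
  simp only [decide_eq_true_eq] at *
  exact fun hm => hx (h hm)

theorem pvMu_dfs_le (grid : List (List Int)) (rows cols : Int) (fuel : Nat) (r c : Int)
    (vis : List (Int × Int)) :
    pvMu rows cols (pvDfsA grid rows cols fuel r c vis).2 ≤ pvMu rows cols vis :=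
  pvMu_le_of_subset rows cols _ _ (pvDfsA_subset grid rows cols fuel r c vis)

-- Simulation: popping (r, c) off the stack performs exactly A's dfs(r, c) and then continues.
theorem pvSim (grid : List (List Int)) (rows cols : Int) :
    ∀ (n : Nat) (vis : List (Int × Int)), pvMu rows cols vis ≤ n →
      ∀ (fuel : Nat) (r c : Int) (s : List (Int × Int)) (t : Int),
        pvMu rows cols vis < fuel →
        pvFill grid rows cols ((r, c) :: s) t vis =
          pvFill grid rows cols s (t + (pvDfsA grid rows cols fuel r c vis).1)
            (pvDfsA grid rows cols fuel r c vis).2 := by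
  intro n
  induction n with
  | zero =>
    intro vis hn fuel r c s t hf
    match fuel, hf with
    | fuel + 1, _ =>
    by_cases hg : r < 0 ∨ rows ≤ r ∨ c < 0 ∨ cols ≤ c ∨ (r, c) ∈ vis ∨ pvCell grid r c = 0
    · rw [pvFill, dif_pos hg]
      simp [pvDfsA, hg]
    · exfalso
      push_neg at hg
      have := pvMu_cons_lt rows cols r c vis (by omega) (by omega) (by omega) (by omega)
        hg.2.2.2.2.1
      omega
  | succ n ih =>
    intro vis hn fuel r c s t hf
    match fuel, hf with
    | fuel + 1, _ =>
    by_cases hg : r < 0 ∨ rows ≤ r ∨ c < 0 ∨ cols ≤ c ∨ (r, c) ∈ vis ∨ pvCell grid r c = 0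
    · rw [pvFill, dif_pos hg]
      simp [pvDfsA, hg]
    · push_neg at hg
      have hlt := pvMu_cons_lt rows cols r c vis (by omega) (by omega) (by omega) (by omega)
        hg.2.2.2.2.1
      have hguard : ¬(r < 0 ∨ rows ≤ r ∨ c < 0 ∨ cols ≤ c ∨ (r, c) ∈ vis ∨ pvCell grid r c = 0) := by
        push_neg; exact hg
      rw [pvFill, dif_neg hguard]
      have h1 : pvMu rows cols ((r, c) :: vis) ≤ n := by omega
      have hf1 : pvMu rows cols ((r, c) :: vis) < fuel := by omega
      have hm1 := pvMu_dfs_le grid rows cols fuel r (c + 1) ((r, c) :: vis)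
      have hm2 := pvMu_dfs_le grid rows cols fuel (r + 1) c
        (pvDfsA grid rows cols fuel r (c + 1) ((r, c) :: vis)).2
      have hm3 := pvMu_dfs_le grid rows cols fuel r (c - 1)
        (pvDfsA grid rows cols fuel (r + 1) c
          (pvDfsA grid rows cols fuel r (c + 1) ((r, c) :: vis)).2).2
      rw [ih _ h1 fuel r (c + 1) _ _ hf1]
      rw [ih _ (by omega) fuel (r + 1) c _ _ (by omega)]
      rw [ih _ (by omega) fuel r (c - 1) _ _ (by omega)]
      rw [ih _ (by omega) fuel (r - 1) c _ _ (by omega)]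
      have hda : pvDfsA grid rows cols (fuel + 1) r c vis =
          (pvCell grid r c
            + (pvDfsA grid rows cols fuel r (c + 1) ((r, c) :: vis)).1
            + (pvDfsA grid rows cols fuel (r + 1) c
                (pvDfsA grid rows cols fuel r (c + 1) ((r, c) :: vis)).2).1
            + (pvDfsA grid rows cols fuel r (c - 1)
                (pvDfsA grid rows cols fuel (r + 1) c
                  (pvDfsA grid rows cols fuel r (c + 1) ((r, c) :: vis)).2).2).1
            + (pvDfsA grid rows cols fuel (r - 1) c
                (pvDfsA grid rows cols fuel r (c - 1)
                  (pvDfsA grid rows cols fuel (r + 1) c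
                    (pvDfsA grid rows cols fuel r (c + 1) ((r, c) :: vis)).2).2).2).1,
           (pvDfsA grid rows cols fuel (r - 1) c
              (pvDfsA grid rows cols fuel r (c - 1)
                (pvDfsA grid rows cols fuel (r + 1) c
                  (pvDfsA grid rows cols fuel r (c + 1) ((r, c) :: vis)).2).2).2).2) := by
        rw [pvDfsA]; rw [if_neg hguard]
      rw [hda]
      congr 1
      ring

theorem pvMu_le_card (rows cols : Int) (vis : List (Int × Int)) :
    pvMu rows cols vis ≤ rows.toNat * cols.toNat := by
  have h := List.countP_le_length (l := pvAllCells rows cols) (p := fun p => decide (p ∉ vis))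
  have hlen : (pvAllCells rows cols).length = rows.toNat * cols.toNat := by
    simp [pvAllCells, List.length_flatMap, Function.comp]
  unfold pvMu
  omega

-- ===== VERDICT (by name: the statement is the Claim_ definition above) =====
theorem numOfFish_spec : Claim_equal_numOfFish := by
  intro grid _ _
  unfold Spec_numOfFish numOfFish numOfFish_alt
  simp only []
  congr 1
  apply List.foldl_ext
  intro st r _
  apply List.foldl_ext
  intro st c _
  by_cases h : pvCell grid r c ≠ 0 ∧ (r, c) ∉ st.2
  · rw [if_pos h, if_pos h]
    have hfuel : pvMu (grid.length : Int) ((grid.headD []).length : Int) st.2 <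
        grid.length * (grid.headD []).length + 1 := by
      have := pvMu_le_card (grid.length : Int) ((grid.headD []).length : Int) st.2
      simp at this ⊢
      omega
    rw [pvSim grid _ _ (pvMu _ _ st.2) st.2 le_rfl _ r c [] 0 hfuel]
    rw [pvFill]
    simp
  · rw [if_neg h, if_neg h]
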